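-- pv_equiv track=rewrite | github.com/valdas1966/mypy | f_quiz/scripts/generate_options.py | _split_token
-- ===== SOURCE A (Python) =====
-- def _split_token(token: str) -> tuple[str, str, str]:
--     """
--     ========================================================================
--      Split a token into (prefix, core, suffix).
--      Prefix/suffix are non-alphanumeric characters (quotes, parens, etc).
--      Example: "'valid'" -> ("'", "valid", "'")
--               "(logic)" -> ("(", "logic", ")")
--               "arguments," -> ("", "arguments", ",")
--     ========================================================================
--     """
--     start = 0
--     while start < len(token) and not token[start].isalnum():
--         start += 1
--     end = len(token)
--     while end > start and not token[end - 1].isalnum():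
--         end -= 1
--     return token[:start], token[start:end], token[end:]
-- ===== SOURCE B (Python) =====
-- def _split_token(token: str) -> tuple[str, str, str]:
--     """Single sweep: collect the alphanumeric positions, then slice once."""
--     idxs = [i for i, c in enumerate(token) if c.isalnum()]
--     if not idxs:
--         return token, '', ''
--     start, end = idxs[0], idxs[-1] + 1
--     return token[:start], token[start:end], token[end:]
-- ===== Notes on version B (the rewrite author's own statement) =====
-- stated objective: simpler
-- what changed: Replaces A's two directional while-loop boundary scans with one forward sweep that collects all alphanumeric indices and slices at the first index and last index + 1, with one explicit no-alphanumeric case.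
import Mathlib
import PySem

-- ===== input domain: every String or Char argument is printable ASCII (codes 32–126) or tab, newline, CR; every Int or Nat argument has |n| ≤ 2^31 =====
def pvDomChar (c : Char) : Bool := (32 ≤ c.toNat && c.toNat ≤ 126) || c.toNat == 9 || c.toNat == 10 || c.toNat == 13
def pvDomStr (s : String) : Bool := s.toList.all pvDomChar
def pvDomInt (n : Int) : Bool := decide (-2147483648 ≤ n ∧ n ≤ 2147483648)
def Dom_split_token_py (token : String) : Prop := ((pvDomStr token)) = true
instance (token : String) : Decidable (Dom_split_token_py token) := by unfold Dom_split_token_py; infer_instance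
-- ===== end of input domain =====

-- B replaces A's two directional while-loop boundary scans with a single forward sweep
-- collecting the alphanumeric indices, then slices once (objective: simpler).

-- ===== PORT A =====
-- the first while loop: start += 1 while the scanned character is not alphanumeric
def pvAStart : List Char → Nat
  | [] => 0
  | c :: cs => if PySem.Chars.isalnum c then 0 else pvAStart cs + 1

-- the second while loop: end -= 1 while end > start and token[end-1] is not alphanumeric
-- (end - 1 is always in range when the loop body runs, so List.getD is exact here)
def pvAEnd (l : List Char) (start : Nat) (e : Nat) : Nat :=
  if h : start < e ∧ ¬ PySem.Chars.isalnum (l.getD (e - 1) ' ') then pvAEnd l start (e - 1)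
  else e
termination_by e
decreasing_by omega

-- slices token[:start], token[start:end], token[end:] with 0 ≤ start ≤ end ≤ len are exact as take/drop
def split_token_py (token : String) : String × String × String :=
  let l := token.toList
  let start := pvAStart l
  let e := pvAEnd l start l.length
  (String.ofList (l.take start), String.ofList ((l.drop start).take (e - start)),
   String.ofList (l.drop e))

-- ===== PORT B =====
-- idxs = [i for i, c in enumerate(token) if c.isalnum()]  (Python ints, all nonnegative here,
-- so .toNat on them is exact for the nonnegative in-range slices below)
def pvIdxs (n : Int) (l : List Char) : List Int :=
  (PySem.List.enumerate l n).filterMap (fun ic => if PySem.Chars.isalnum ic.2 then some ic.1 else none)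

def split_token_py_alt (token : String) : String × String × String :=
  let l := token.toList
  match pvIdxs 0 l with
  | [] => (token, "", "")
  | i :: rest =>
    let s := i
    let e := (i :: rest).getLast (by simp) + 1
    (String.ofList (l.take s.toNat), String.ofList ((l.drop s.toNat).take (e.toNat - s.toNat)),
     String.ofList (l.drop e.toNat))

-- ===== PRECONDITION & SPEC =====
def Spec_split_token_py (token : String) (out : String × String × String) : Prop := out = split_token_py_alt token
instance (token : String) (out : String × String × String) : Decidable (Spec_split_token_py token out) := by unfold Spec_split_token_py; infer_instance

-- ===== CLAIM (what is proved, stated in full; the proofs are below) =====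
def Claim_equal_split_token_py : Prop := ∀ (token : String), Dom_split_token_py token → Spec_split_token_py token (split_token_py token)

-- ===== LEMMAS AND PROOFS =====

-- index of the first alphanumeric character, if any
def pvFirst? : List Char → Option Nat
  | [] => none
  | c :: cs => if PySem.Chars.isalnum c then some 0 else (pvFirst? cs).map (· + 1)

-- index of the last alphanumeric character, if any
def pvLast? : List Char → Option Nat
  | [] => none
  | c :: cs =>
    match pvLast? cs with
    | some m => some (m + 1)
    | none => if PySem.Chars.isalnum c then some 0 else none

theorem pvGetD_mem {α : Type} (l : List α) (i : Nat) (d : α) (h : i < l.length) :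
    l.getD i d ∈ l := by
  rw [List.getD_eq_getElem l d h]
  exact l.getElem_mem h

theorem pvIdxs_cons (n : Int) (c : Char) (cs : List Char) :
    pvIdxs n (c :: cs) = if PySem.Chars.isalnum c then n :: pvIdxs (n + 1) cs else pvIdxs (n + 1) cs := by
  by_cases hc : PySem.Chars.isalnum c <;>
    simp [pvIdxs, PySem.List.enumerate_cons, hc]

theorem pvIdxs_head? (n : Int) (l : List Char) :
    (pvIdxs n l).head? = (pvFirst? l).map (fun m => n + m) := by
  induction l generalizing n with
  | nil => simp [pvIdxs, pvFirst?]
  | cons c cs ih =>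
    rw [pvIdxs_cons, pvFirst?]
    split
    · simp
    · rw [ih]
      cases h : pvFirst? cs <;> simp <;> omega

theorem pvIdxs_getLast? (n : Int) (l : List Char) :
    (pvIdxs n l).getLast? = (pvLast? l).map (fun m => n + m) := by
  induction l generalizing n with
  | nil => simp [pvIdxs, pvLast?]
  | cons c cs ih =>
    rw [pvIdxs_cons, pvLast?]
    split
    · rw [List.getLast?_cons, ih]
      cases h : pvLast? cs <;> simp <;> omega
    · rw [ih]
      cases h : pvLast? cs <;> simp <;> omega

theorem pvFirst?_none (l : List Char) (h : pvFirst? l = none) :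
    pvAStart l = l.length ∧ ∀ c ∈ l, ¬ PySem.Chars.isalnum c := by
  induction l with
  | nil => simp [pvAStart]
  | cons c cs ih =>
    rw [pvFirst?] at h
    split at h
    · simp at h
    · rename_i hc
      simp only [Option.map_eq_none_iff] at h
      obtain ⟨h1, h2⟩ := ih h
      refine ⟨by simp [pvAStart, hc, h1], ?_⟩
      intro x hx
      rcases List.mem_cons.mp hx with rfl | hx
      · exact hc
      · exact h2 x hx

theorem pvFirst?_some (l : List Char) (m : Nat) (h : pvFirst? l = some m) :
    pvAStart l = m := by
  induction l generalizing m with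
  | nil => simp [pvFirst?] at h
  | cons c cs ih =>
    rw [pvFirst?] at h
    split at h
    · rename_i hc
      simp at h
      simp [pvAStart, hc, ← h]
    · rename_i hc
      cases hm : pvFirst? cs with
      | none => rw [hm] at h; simp at h
      | some m' =>
        rw [hm] at h
        simp at h
        simp [pvAStart, hc, ih m' hm, ← h]

theorem pvLast?_none (l : List Char) (h : pvLast? l = none) :
    ∀ c ∈ l, ¬ PySem.Chars.isalnum c := by
  induction l with
  | nil => simp
  | cons c cs ih =>
    cases hm : pvLast? cs with
    | some m => simp [pvLast?, hm] at h
    | none =>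
      by_cases hc : PySem.Chars.isalnum c
      · simp [pvLast?, hm, hc] at h
      · intro x hx
        rcases List.mem_cons.mp hx with rfl | hx
        · exact hc
        · exact ih hm x hx

theorem pvLast?_some (l : List Char) (m : Nat) (h : pvLast? l = some m) :
    m < l.length ∧ PySem.Chars.isalnum (l.getD m ' ') ∧
      ∀ j, m < j → j < l.length → ¬ PySem.Chars.isalnum (l.getD j ' ') := by
  induction l generalizing m with
  | nil => simp [pvLast?] at h
  | cons c cs ih =>
    cases hm : pvLast? cs with
    | some m' =>
      have h' : m = m' + 1 := by simp [pvLast?, hm] at h; omega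
      obtain ⟨h1, h2, h3⟩ := ih m' hm
      subst h' 
      refine ⟨by simpa using h1, by simpa using h2, ?_⟩
      intro j hj1 hj2
      obtain ⟨j', rfl⟩ : ∃ j', j = j' + 1 := ⟨j - 1, by omega⟩
      simpa using h3 j' (by omega) (by simpa using hj2)
    | none =>
      by_cases hc : PySem.Chars.isalnum c
      · have h' : m = 0 := by simp [pvLast?, hm, hc] at h; omega
        subst h' 
        refine ⟨by simp, by simpa using hc, ?_⟩
        intro j hj1 hj2
        obtain ⟨j', rfl⟩ : ∃ j', j = j' + 1 := ⟨j - 1, by omega⟩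
        have hmem : cs.getD j' ' ' ∈ cs := pvGetD_mem cs j' ' ' (by simpa using hj2)
        simpa using pvLast?_none cs hm _ hmem
      · simp [pvLast?, hm, hc] at h

theorem pvFirst?_le_pvLast? (l : List Char) (s : Nat) (h : pvFirst? l = some s) :
    ∃ m, pvLast? l = some m ∧ s ≤ m := by
  induction l generalizing s with
  | nil => simp [pvFirst?] at h
  | cons c cs ih =>
    rw [pvFirst?] at h
    rw [pvLast?]
    split at h
    · rename_i hc
      simp at h
      cases hm : pvLast? cs with
      | some m => exact ⟨m + 1, by simp, by omega⟩
      | none => exact ⟨0, by simp [hc], by omega⟩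
    · cases hs : pvFirst? cs with
      | none => rw [hs] at h; simp at h
      | some s' =>
        rw [hs] at h
        simp at h
        obtain ⟨m', hm', hle⟩ := ih s' hs
        rw [hm']
        exact ⟨m' + 1, rfl, by omega⟩

theorem pvAEnd_stop (l : List Char) (start e : Nat)
    (h : ¬ (start < e ∧ ¬ PySem.Chars.isalnum (l.getD (e - 1) ' '))) :
    pvAEnd l start e = e := by
  rw [pvAEnd, dif_neg h]

theorem pvAEnd_eq (l : List Char) (start m : Nat)
    (hP : PySem.Chars.isalnum (l.getD m ' '))
    (hAfter : ∀ j, m < j → j < l.length → ¬ PySem.Chars.isalnum (l.getD j ' '))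
    (hs : start ≤ m) :
    ∀ e, m + 1 ≤ e → e ≤ l.length → pvAEnd l start e = m + 1 := by
  intro e he
  induction e, he using Nat.le_induction with
  | base =>
    intro _
    apply pvAEnd_stop
    simp only [not_and, not_not]
    intro _
    simpa using hP
  | succ e he ih =>
    intro hlen
    rw [pvAEnd, dif_pos ⟨by omega, by simpa using hAfter e (by omega) (by omega)⟩]
    exact ih (by omega)

theorem pvAEnd_self (l : List Char) (e : Nat) : pvAEnd l e e = e := by
  apply pvAEnd_stop
  simp

-- ===== VERDICT (by name: the statement is the Claim_ definition above) =====
theorem split_token_py_spec : Claim_equal_split_token_py := by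
  intro token _
  unfold Spec_split_token_py split_token_py split_token_py_alt
  set l := token.toList with hl
  cases hidx : pvIdxs 0 l with
  | nil =>
    have hfirst : pvFirst? l = none := by
      have h0 := pvIdxs_head? 0 l
      rw [hidx] at h0
      cases h : pvFirst? l
      · rfl
      · rw [h] at h0; simp at h0
    obtain ⟨hstart, _⟩ := pvFirst?_none l hfirst
    simp only [hidx, hstart, pvAEnd_self]
    simp [hl, ← String.length_toList]
  | cons i rest =>
    have hhead : (pvIdxs 0 l).head? = some i := by rw [hidx]; rfl
    cases hf : pvFirst? l with
    | none => rw [pvIdxs_head? 0 l, hf] at hhead; simp at hhead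
    | some s =>
      rw [pvIdxs_head? 0 l, hf] at hhead
      simp at hhead
      subst hhead
      obtain ⟨m, hm, hsm⟩ := pvFirst?_le_pvLast? l s hf
      have hlast : ((s : Int) :: rest).getLast (by simp) = (m : Int) := by
        have h1 : ((s : Int) :: rest).getLast? = some ((m : Int)) := by
          rw [← hidx, pvIdxs_getLast? 0 l, hm]; simp
        rwa [List.getLast?_eq_some_getLast (by simp), Option.some_inj] at h1
      obtain ⟨hmlt, hPm, hAfter⟩ := pvLast?_some l m hm
      have hstart : pvAStart l = s := pvFirst?_some l s hf
      have hend : pvAEnd l s l.length = m + 1 :=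
        pvAEnd_eq l s m hPm hAfter hsm l.length (by omega) le_rfl
      simp only [hidx, hstart, hend, hlast]
      norm_num
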